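-- pv_equiv track=rewrite | github.com/kshitij-bhardwaj/2025_musiclearn_async | notewise_mistakes.py | note_durations
-- ===== SOURCE A (Python) =====
-- def note_durations(notes):
--     # Segment teacher notes into continuous segments and store their start and end indices along with the note
--     notes_duration = []
--     start_idx = 0
--     end_idx = 0
--
--     for i in range(len(notes)-1):
--         if notes[i] == notes[i+1]:
--             end_idx = i+1
--         else:
--             duration = end_idx - start_idx + 1
--             notes_duration.append((notes[i], start_idx , end_idx))
--             start_idx = i+1
--             end_idx = i+1
--
--     notes_duration.append((notes[-1], start_idx , len(notes)-1))
--
--     return notes_duration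
-- ===== SOURCE B (Python) =====
-- def note_durations(notes):
--     # Two-pointer scan: for each run start i, advance j to the run's last index, emit, jump past it.
--     out = []
--     n = len(notes)
--     i = 0
--     while i < n:
--         j = i
--         while j + 1 < n and notes[j + 1] == notes[j]:
--             j += 1
--         out.append((notes[i], i, j))
--         i = j + 1
--     return out
-- ===== Notes on version B (the rewrite author's own statement) =====
-- stated objective: alternative
-- what changed: Replaces A's single indexed scan carrying (start_idx, end_idx) state across every position with a two-pointer nested-loop structure: an outer loop over run starts and an inner loop that advances a pointer to each run's last index, emitting one tuple per run and jumping past it.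
import Mathlib
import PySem

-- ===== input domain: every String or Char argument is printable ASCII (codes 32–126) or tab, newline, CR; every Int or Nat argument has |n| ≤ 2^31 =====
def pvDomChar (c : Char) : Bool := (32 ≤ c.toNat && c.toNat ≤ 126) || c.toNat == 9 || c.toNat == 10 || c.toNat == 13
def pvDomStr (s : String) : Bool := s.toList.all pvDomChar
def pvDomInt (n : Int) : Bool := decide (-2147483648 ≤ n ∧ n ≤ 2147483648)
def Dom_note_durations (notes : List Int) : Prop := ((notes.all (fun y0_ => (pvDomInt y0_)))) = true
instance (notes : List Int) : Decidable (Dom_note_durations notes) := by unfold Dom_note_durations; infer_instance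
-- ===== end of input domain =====

-- B replaces A's single stateful scan with a two-pointer nested-loop run finder (objective: alternative decomposition, same cost).

-- ===== PORT A =====
-- loop body of A: state = (notes_duration, start_idx, end_idx)
def pvStepA (notes : List Int) (s : List (Int × Int × Int) × Int × Int) (i : Int) :
    List (Int × Int × Int) × Int × Int :=
  -- indices i and i+1 are always in range inside the loop; .getD 0 is never taken on Pre_
  if (PySem.List.pyGet? notes i).getD 0 = (PySem.List.pyGet? notes (i+1)).getD 0 then
    (s.1, s.2.1, i + 1)
  else
    (s.1 ++ [((PySem.List.pyGet? notes i).getD 0, s.2.1, s.2.2)], i + 1, i + 1)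

def note_durations (notes : List Int) : List (Int × Int × Int) :=
  let n : Int := notes.length
  let st := (PySem.List.pyRange 0 (n - 1) 1).foldl (pvStepA notes) ([], 0, 0)
  -- notes[-1]: in range whenever notes ≠ [] (Pre_); A raises IndexError on []
  st.1 ++ [((PySem.List.pyGet? notes (-1)).getD 0, st.2.1, n - 1)]

-- ===== PORT B =====
-- inner while: advance j while notes[j+1] == notes[j]; returns the run's last index
def pvRunEnd (notes : List Int) (n j : Int) : Int :=
  if h : j + 1 < n ∧ (PySem.List.pyGet? notes (j+1)).getD 0 = (PySem.List.pyGet? notes j).getD 0 then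
    pvRunEnd notes n (j+1)
  else j
termination_by (n - j).toNat
decreasing_by omega

-- the outer while needs j ≤ pvRunEnd … j for termination
theorem pvRunEnd_ge (notes : List Int) (n j : Int) : j ≤ pvRunEnd notes n j := by
  rw [pvRunEnd]
  split
  · have := pvRunEnd_ge notes n (j+1); omega
  · omega
termination_by (n - j).toNat
decreasing_by omega

-- outer while: i runs over run starts
def pvOuter (notes : List Int) (n i : Int) (out : List (Int × Int × Int)) :
    List (Int × Int × Int) :=
  if _h : i < n then
    pvOuter notes n (pvRunEnd notes n i + 1)
      (out ++ [((PySem.List.pyGet? notes i).getD 0, i, pvRunEnd notes n i)])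
  else out
termination_by (n - i).toNat
decreasing_by have := pvRunEnd_ge notes n i; omega

def note_durations_alt (notes : List Int) : List (Int × Int × Int) :=
  pvOuter notes (notes.length : Int) 0 []

-- ===== PRECONDITION & SPEC =====
-- A raises IndexError at notes[-1] on the empty list; Pre_ excludes exactly [].
def Pre_note_durations (notes : List Int) : Prop := notes ≠ []
instance (notes : List Int) : Decidable (Pre_note_durations notes) := by unfold Pre_note_durations; infer_instance
def pvWitness_note_durations : List Int := [60, 60, 62]

def Spec_note_durations (notes : List Int) (out : List (Int × Int × Int)) : Prop := out = note_durations_alt notes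
instance (notes : List Int) (out : List (Int × Int × Int)) : Decidable (Spec_note_durations notes out) := by unfold Spec_note_durations; infer_instance

-- ===== CLAIM (what is proved, stated in full; the proofs are below) =====
def Claim_equal_note_durations : Prop := ∀ (notes : List Int), Dom_note_durations notes → Pre_note_durations notes → Spec_note_durations notes (note_durations notes)

-- ===== LEMMAS AND PROOFS =====

-- the element at a run's last index equals the element at its start
theorem pvRunEnd_get (notes : List Int) (n j : Int) :
    (PySem.List.pyGet? notes (pvRunEnd notes n j)).getD 0 = (PySem.List.pyGet? notes j).getD 0 := by
  rw [pvRunEnd]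
  split
  · next h => rw [pvRunEnd_get notes n (j+1)]; exact h.2
  · rfl
termination_by (n - j).toNat
decreasing_by omega

theorem pvRunEnd_lt (notes : List Int) (n j : Int) (h : j < n) : pvRunEnd notes n j < n := by
  rw [pvRunEnd]
  split
  · next hc => exact pvRunEnd_lt notes n (j+1) hc.1
  · exact h
termination_by (n - j).toNat
decreasing_by omega

-- main invariant: A's fold from position a, mid-run started at s (with end_idx = a and
-- notes[s] = notes[a]), followed by the trailing append, equals B's outer loop continued
-- past the current run after emitting that run's tuple.
theorem pv_main (notes : List Int) (a s : Int) (acc : List (Int × Int × Int))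
    (ha0 : 0 ≤ a) (han : a < (notes.length : Int))
    (hgs : (PySem.List.pyGet? notes s).getD 0 = (PySem.List.pyGet? notes a).getD 0) :
    ((PySem.List.pyRange a ((notes.length : Int) - 1) 1).foldl (pvStepA notes) (acc, s, a)).1
        ++ [((PySem.List.pyGet? notes (-1)).getD 0,
             ((PySem.List.pyRange a ((notes.length : Int) - 1) 1).foldl (pvStepA notes) (acc, s, a)).2.1,
             (notes.length : Int) - 1)]
      = pvOuter notes (notes.length : Int) (pvRunEnd notes (notes.length : Int) a + 1)
          (acc ++ [((PySem.List.pyGet? notes s).getD 0, s, pvRunEnd notes (notes.length : Int) a)]) := by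
  by_cases hend : a < (notes.length : Int) - 1
  · rw [PySem.List.pyRange_one_cons hend]
    simp only [List.foldl_cons]
    by_cases heq : (PySem.List.pyGet? notes a).getD 0 = (PySem.List.pyGet? notes (a+1)).getD 0
    · -- equal step: A keeps (acc, s), B's pvRunEnd also advances
      have hrun : pvRunEnd notes (notes.length : Int) a = pvRunEnd notes (notes.length : Int) (a+1) := by
        rw [pvRunEnd]; rw [dif_pos ⟨by omega, heq.symm⟩]
      rw [pvStepA, if_pos heq, hrun]
      exact pv_main notes (a+1) s acc (by omega) (by omega) (hgs.trans heq)
    · -- boundary: A appends (notes[a], s, a) and restarts at a+1; pvRunEnd a = a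
      have hrun : pvRunEnd notes (notes.length : Int) a = a := by
        rw [pvRunEnd]; rw [dif_neg]; intro hc; exact heq hc.2.symm
      rw [pvStepA, if_neg heq, hrun]
      have ih := pv_main notes (a+1) (a+1)
        (acc ++ [((PySem.List.pyGet? notes a).getD 0, s, a)]) (by omega) (by omega) rfl
      rw [ih, hgs]
      -- fold B's outer loop one step at position a+1
      have hstep : pvOuter notes (notes.length : Int) (a+1)
            (acc ++ [((PySem.List.pyGet? notes a).getD 0, s, a)])
          = pvOuter notes (notes.length : Int) (pvRunEnd notes (notes.length : Int) (a+1) + 1)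
            ((acc ++ [((PySem.List.pyGet? notes a).getD 0, s, a)]) ++
              [((PySem.List.pyGet? notes (a+1)).getD 0, a+1, pvRunEnd notes (notes.length : Int) (a+1))]) := by
        rw [pvOuter]; rw [dif_pos (show a + 1 < (notes.length : Int) by omega)]
      rw [hstep]
  · -- a = length - 1: range is empty; both sides emit the final run
    have hae : a = (notes.length : Int) - 1 := by omega
    rw [PySem.List.pyRange_one_eq_nil (by omega)]
    simp only [List.foldl_nil]
    have hrun : pvRunEnd notes (notes.length : Int) a = a := by
      rw [pvRunEnd]; rw [dif_neg]; intro hc; omega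
    rw [hrun]
    rw [pvOuter]
    rw [dif_neg (by omega)]
    have hne : notes ≠ [] := by intro hnil; subst hnil; simp at han; omega
    have hneg : (PySem.List.pyGet? notes (-1)).getD 0 = (PySem.List.pyGet? notes a).getD 0 := by
      rw [PySem.List.pyGet?_neg_one]
      rw [hae]
      rw [show ((notes.length : Int) - 1) = ((notes.length - 1 : Nat) : Int) by
        have : 0 < notes.length := List.length_pos_iff.mpr hne; omega]
      rw [PySem.List.pyGet?_natCast]
      rw [List.getLast?_eq_getElem?]
    rw [hneg, hgs, hae]
termination_by ((notes.length : Int) - a).toNat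
decreasing_by all_goals omega

-- ===== VERDICT (by name: the statement is the Claim_ definition above) =====
theorem note_durations_spec : Claim_equal_note_durations := by
  intro notes _ hpre
  unfold Spec_note_durations note_durations note_durations_alt
  have hn : 0 < (notes.length : Int) := by
    have : 0 < notes.length := List.length_pos_iff.mpr hpre
    omega
  have h := pv_main notes 0 0 [] (le_refl 0) hn rfl
  simp only [] at h ⊢
  rw [h]
  have hstep : pvOuter notes (notes.length : Int) 0 []
      = pvOuter notes (notes.length : Int) (pvRunEnd notes (notes.length : Int) 0 + 1)
        ([] ++ [((PySem.List.pyGet? notes 0).getD 0, 0, pvRunEnd notes (notes.length : Int) 0)]) := by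
    rw [pvOuter]; rw [dif_pos hn]
  rw [hstep]
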